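-- pv_equiv track=rewrite | github.com/pypa/pip-audit | pip_audit/_dependency_source/requirement.py | _build_hash_options_mapping
-- ===== SOURCE A (Python) =====
-- def _build_hash_options_mapping(hash_options: list[str]) -> dict[str, list[str]]:
--     """
--     A helper that takes a list of hash options and returns a dictionary mapping from hash
--     algorithm (e.g. sha256) to a list of values.
--     """
--     mapping: dict[str, list[str]] = {}
--     for hash_option in hash_options:
--         algorithm, hash_ = hash_option.split(":")
--         if algorithm not in mapping:
--             mapping[algorithm] = []
--         mapping[algorithm].append(hash_)
--     return mapping
-- ===== SOURCE B (Python) =====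
-- def _build_hash_options_mapping(hash_options: list[str]) -> dict[str, list[str]]:
--     # split everything first, then group: dedup algorithms in first-occurrence
--     # order and collect each group with a filter pass over the pairs
--     pairs = []
--     for hash_option in hash_options:
--         algorithm, hash_ = hash_option.split(":")
--         pairs.append((algorithm, hash_))
--     return {
--         algorithm: [h for a, h in pairs if a == algorithm]
--         for algorithm in dict.fromkeys(a for a, _ in pairs)
--     }
-- ===== Notes on version B (the rewrite author's own statement) =====
-- stated objective: alternative
-- what changed: Replaces A's incremental dict accumulation with a split-all-then-group pass: map every option to an (algorithm, hash) pair, dedup the algorithms in first-occurrence order, then build each group's list by filtering the pairs.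
import Mathlib
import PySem

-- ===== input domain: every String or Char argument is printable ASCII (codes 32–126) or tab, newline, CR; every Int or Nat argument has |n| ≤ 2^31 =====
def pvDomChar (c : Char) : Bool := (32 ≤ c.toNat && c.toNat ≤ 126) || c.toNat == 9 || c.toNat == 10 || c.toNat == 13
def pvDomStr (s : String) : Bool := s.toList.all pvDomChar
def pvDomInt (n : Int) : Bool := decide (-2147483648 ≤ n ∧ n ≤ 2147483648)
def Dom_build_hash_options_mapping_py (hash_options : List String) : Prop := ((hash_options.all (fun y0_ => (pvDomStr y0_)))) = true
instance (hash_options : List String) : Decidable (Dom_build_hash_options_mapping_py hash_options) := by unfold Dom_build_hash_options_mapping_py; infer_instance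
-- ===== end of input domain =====

-- B replaces A's incremental dict accumulation with a split-all-then-group pass
-- (pairs, then first-occurrence dedup of algorithms, then one filter per algorithm);
-- an alternative decomposition, not claimed faster.


-- ===== PORT A =====
-- 'algorithm, hash_ = hash_option.split(":")'; the fallback branch is unreachable
-- under Pre_ (Python raises ValueError there).
def pvSplit2 (s : String) : String × String :=
  match PySem.Str.split? s ":" with
  | some [a, h] => (a, h)
  | _ => ("", "")

def build_hash_options_mapping_py (hash_options : List String) : List (String × List String) :=
  (hash_options.foldl (fun mapping hash_option =>
      let p := pvSplit2 hash_option
      let mapping := if mapping.contains p.1 then mapping else mapping.insert p.1 ([] : List String)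
      mapping.modify p.1 [] (fun l => l ++ [p.2]))
    PySem.Dict.empty).items

-- ===== PORT B =====
def build_hash_options_mapping_py_alt (hash_options : List String) : List (String × List String) :=
  let pairs := hash_options.map pvSplit2
  (PySem.List.dedup (pairs.map (·.1))).map
    (fun algorithm => (algorithm, (pairs.filter (fun p => p.1 == algorithm)).map (·.2)))

-- ===== PRECONDITION & SPEC =====
-- Pre_ excludes exactly the inputs where Python's two-way unpacking of
-- hash_option.split(":") raises ValueError (a string with ≠ 1 colon); B raises there too.
def Pre_build_hash_options_mapping_py (hash_options : List String) : Prop :=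
  (hash_options.all (fun s => ((PySem.Str.split? s ":").getD []).length == 2)) = true
instance (hash_options : List String) : Decidable (Pre_build_hash_options_mapping_py hash_options) := by unfold Pre_build_hash_options_mapping_py; infer_instance

def pvWitness_build_hash_options_mapping_py : List String := ["sha256:abc", "md5:d1", "sha256:xyz"]

def Spec_build_hash_options_mapping_py (hash_options : List String) (out : List (String × List String)) : Prop := out = build_hash_options_mapping_py_alt hash_options
instance (hash_options : List String) (out : List (String × List String)) : Decidable (Spec_build_hash_options_mapping_py hash_options out) := by unfold Spec_build_hash_options_mapping_py; infer_instance

-- ===== CLAIM (what is proved, stated in full; the proofs are below) =====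
def Claim_equal_build_hash_options_mapping_py : Prop := ∀ (hash_options : List String), Dom_build_hash_options_mapping_py hash_options → Pre_build_hash_options_mapping_py hash_options → Spec_build_hash_options_mapping_py hash_options (build_hash_options_mapping_py hash_options)

-- ===== LEMMAS AND PROOFS =====

-- A's loop body (ensure key, then append) is a single Dict.modify.
theorem stepA_eq_modify (d : PySem.Dict String (List String)) (a h : String) :
    (if d.contains a then d else d.insert a ([] : List String)).modify a [] (fun l => l ++ [h])
      = d.modify a [] (fun l => l ++ [h]) := by
  by_cases hc : d.contains a = true
  · simp [hc]
  · simp only [Bool.not_eq_true] at hc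
    simp [hc, PySem.Dict.modify, PySem.Dict.getD_insert_self,
      PySem.Dict.getD_of_not_contains d ([] : List String) hc, PySem.Dict.insert_insert_self]

theorem foldA_eq_foldPairs (hash_options : List String) :
    hash_options.foldl (fun mapping hash_option =>
        let p := pvSplit2 hash_option
        let mapping := if mapping.contains p.1 then mapping else mapping.insert p.1 ([] : List String)
        mapping.modify p.1 [] (fun l => l ++ [p.2]))
      PySem.Dict.empty
    = (hash_options.map pvSplit2).foldl
        (fun d p => d.modify p.1 [] (fun l => l ++ [p.2])) PySem.Dict.empty := by
  rw [List.foldl_map]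
  exact PySem.List.foldl_congr_mem _ _ _ _ (fun d s _ => stepA_eq_modify d (pvSplit2 s).1 (pvSplit2 s).2)

-- ===== VERDICT (by name: the statement is the Claim_ definition above) =====
theorem build_hash_options_mapping_py_spec : Claim_equal_build_hash_options_mapping_py := by
  intro hash_options _ _
  unfold Spec_build_hash_options_mapping_py
  unfold build_hash_options_mapping_py build_hash_options_mapping_py_alt
  rw [foldA_eq_foldPairs]
  set pairs := hash_options.map pvSplit2 with hp
  have hnd : ((pairs.foldl (fun d p => d.modify p.1 [] (fun l => l ++ [p.2]))
      PySem.Dict.empty).keys).Nodup :=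
    PySem.Dict.nodup_keys_foldl_modify_key pairs Prod.fst [] (fun _ p l => l ++ [p.2])
      PySem.Dict.empty PySem.Dict.nodup_keys_empty
  rw [PySem.Dict.items_eq_map_keys _ hnd ([] : List String)]
  rw [PySem.Dict.keys_foldl_modify_key pairs Prod.fst [] (fun _ p l => l ++ [p.2]) PySem.Dict.empty]
  rw [PySem.Dict.keys_empty, PySem.Set.update_nil_left]
  simp only [PySem.List.dedup_eq_ofList]
  refine List.map_congr_left (fun k _ => ?_)
  rw [PySem.Dict.getD_foldl_modify_append, PySem.Dict.getD_empty]
  simp
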